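-- pv_equiv track=rewrite | github.com/TrevorJA/NYCOptimization | src/diagnostics.py | problem_name_for
-- ===== SOURCE A (Python) =====
-- _FORMULATION_TO_PROBLEM = {
--     "ffmp": "drb_ffmp",
--     "rbf":  "drb_rbf",
--     "tree": "drb_tree",
--     "ann":  "drb_ann",
-- }
--
-- def problem_name_for(slug: str) -> str:
--     """Return the MOEAFramework problem name matching a slug's formulation family.
--
--     Strategy: strip a leading ``<tag>_`` prefix until the remaining string is
--     a known formulation family (ffmp/rbf/tree/ann). Works for both plain
--     slugs (``ffmp``) and tagged ones (``smoke_ffmp``, ``v2_rbf``).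
--     """
--     s = slug
--     while s:
--         if s in _FORMULATION_TO_PROBLEM:
--             return _FORMULATION_TO_PROBLEM[s]
--         if "_" not in s:
--             break
--         s = s.split("_", 1)[1]
--     raise ValueError(
--         f"Cannot resolve MOEAFramework problem name for slug '{slug}'. "
--         f"Expected the slug to contain one of: "
--         f"{sorted(_FORMULATION_TO_PROBLEM)}."
--     )
-- ===== SOURCE B (Python) =====
-- _FORMULATION_TO_PROBLEM = {
--     "ffmp": "drb_ffmp",
--     "rbf":  "drb_rbf",
--     "tree": "drb_tree",
--     "ann":  "drb_ann",
-- }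
--
-- def problem_name_for(slug: str) -> str:
--     # Every known formulation key is underscore-free, so only the last
--     # underscore-delimited segment of the slug can ever match: extract it once.
--     key = slug.rsplit("_", 1)[-1]
--     if key in _FORMULATION_TO_PROBLEM:
--         return _FORMULATION_TO_PROBLEM[key]
--     raise ValueError(
--         f"Cannot resolve MOEAFramework problem name for slug '{slug}'. "
--         f"Expected the slug to contain one of: "
--         f"{sorted(_FORMULATION_TO_PROBLEM)}."
--     )
-- ===== Notes on version B (the rewrite author's own statement) =====
-- stated objective: simpler
-- what changed: Replaced A's prefix-stripping while-loop (repeated dict membership tests and split steps) with a single closed-form extraction of the last underscore-delimited segment via rsplit and one dict lookup; this is exact because every dict key is underscore-free, so A's loop can only ever match on the final segment.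
import Mathlib
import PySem

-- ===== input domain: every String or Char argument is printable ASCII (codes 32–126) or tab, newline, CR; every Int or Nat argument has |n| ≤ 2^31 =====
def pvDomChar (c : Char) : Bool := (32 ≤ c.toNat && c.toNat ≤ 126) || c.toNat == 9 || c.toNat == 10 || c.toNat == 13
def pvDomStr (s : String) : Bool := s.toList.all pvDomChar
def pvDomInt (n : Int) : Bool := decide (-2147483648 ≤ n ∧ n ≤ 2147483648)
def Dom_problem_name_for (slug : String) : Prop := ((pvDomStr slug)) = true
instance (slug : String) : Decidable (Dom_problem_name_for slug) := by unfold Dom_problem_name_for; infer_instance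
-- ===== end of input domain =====

-- B replaces A's prefix-stripping while-loop with a single closed-form
-- last-segment extraction and one lookup (simpler; same values, same raise).

-- ===== PORT A =====
-- the module-level dict _FORMULATION_TO_PROBLEM, as an association list
def pvTable : List (List Char × String) :=
  [("ffmp".toList, "drb_ffmp"), ("rbf".toList, "drb_rbf"),
   ("tree".toList, "drb_tree"), ("ann".toList, "drb_ann")]

-- s.split("_", 1)[1]  (only called by A when '_' is in s)
def pvSplitRest : List Char → List Char
  | [] => []
  | c :: cs => if c = '_' then cs else pvSplitRest cs

theorem pvSplitRest_len_le : ∀ l : List Char, (pvSplitRest l).length ≤ l.length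
  | [] => Nat.le_refl _
  | c :: cs => by
      simp only [pvSplitRest]
      split
      · simp
      · exact Nat.le_trans (pvSplitRest_len_le cs) (Nat.le_succ _)

theorem pvSplitRest_len_lt (c : Char) (cs : List Char) :
    (pvSplitRest (c :: cs)).length < (c :: cs).length := by
  simp only [pvSplitRest]
  split
  · simp
  · exact Nat.lt_succ_of_le (pvSplitRest_len_le cs)

-- A's while-loop; "" stands for the ValueError path (excluded by Pre_)
def pvALoop (s : List Char) : String :=
  match hs : s with
  | [] => ""          -- while condition fails → raise
  | _ :: _ =>
    match pvTable.lookup s with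
    | some v => v     -- s in dict → return dict[s]
    | none =>
      if '_' ∈ s then pvALoop (pvSplitRest s)   -- s = s.split("_",1)[1]
      else ""         -- break → raise
termination_by s.length
decreasing_by subst hs; exact pvSplitRest_len_lt _ _

def problem_name_for (slug : String) : String := pvALoop slug.toList

-- ===== PORT B =====
-- slug.rsplit("_", 1)[-1] : the segment after the last '_' (or the whole string)
def pvLastSeg (s : List Char) : List Char :=
  (s.reverse.takeWhile (fun c => c ≠ '_')).reverse

def problem_name_for_alt (slug : String) : String :=
  match pvTable.lookup (pvLastSeg slug.toList) with
  | some v => v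
  | none => ""        -- key not in dict → raise (excluded by Pre_)

-- ===== PRECONDITION & SPEC =====
-- Pre_ excludes exactly the slugs whose last underscore-delimited segment is not a
-- known formulation key: on those BOTH A and B raise ValueError (no returns excluded).
def Pre_problem_name_for (slug : String) : Prop :=
  pvLastSeg slug.toList ∈ pvTable.map Prod.fst
instance (slug : String) : Decidable (Pre_problem_name_for slug) := by unfold Pre_problem_name_for; infer_instance
def pvWitness_problem_name_for : String := "smoke_ffmp"

def Spec_problem_name_for (slug : String) (out : String) : Prop := out = problem_name_for_alt slug
instance (slug : String) (out : String) : Decidable (Spec_problem_name_for slug out) := by unfold Spec_problem_name_for; infer_instance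

-- ===== CLAIM (what is proved, stated in full; the proofs are below) =====
def Claim_equal_problem_name_for : Prop := ∀ (slug : String), Dom_problem_name_for slug → Pre_problem_name_for slug → Spec_problem_name_for slug (problem_name_for slug)

-- ===== LEMMAS AND PROOFS =====

-- a successful dict lookup means s is one of the four (underscore-free) keys
theorem pvLookup_no_underscore (s : List Char) (v : String)
    (h : pvTable.lookup s = some v) : '_' ∉ s := by
  simp only [pvTable, List.lookup] at h
  repeat' split at h
  all_goals
    first
      | (rename_i hbeq; obtain rfl := eq_of_beq hbeq; decide)
      | cases h

theorem pvLastSeg_no_underscore (s : List Char) (h : '_' ∉ s) : pvLastSeg s = s := by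
  unfold pvLastSeg
  rw [List.takeWhile_eq_self_iff.mpr, List.reverse_reverse]
  intro a ha
  simp only [decide_eq_true_eq, ne_eq]
  intro he; exact h (by simpa [he] using (List.mem_reverse.mp ha))

theorem pvTakeWhile_append_of_mem (p : Char → Bool) (hp : p '_' = false)
    (l t : List Char) (h : '_' ∈ l) :
    (l ++ t).takeWhile p = l.takeWhile p := by
  induction l with
  | nil => cases h
  | cons a l ih =>
    by_cases ha : a = '_'
    · subst ha; simp [hp]
    · have hl : '_' ∈ l := by
        cases h with
        | head => exact absurd rfl ha
        | tail _ h' => exact h'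
      cases hpa : p a <;> simp [hpa, ih hl]

theorem pvTakeWhile_append_underscore (p : Char → Bool) (hp : p '_' = false)
    (l : List Char) :
    (l ++ ['_']).takeWhile p = l.takeWhile p := by
  induction l with
  | nil => simp [hp]
  | cons a l ih => cases hpa : p a <;> simp [hpa, ih]

-- stripping the first '_'-prefix does not change the last segment
theorem pvLastSeg_splitRest (s : List Char) (h : '_' ∈ s) :
    pvLastSeg (pvSplitRest s) = pvLastSeg s := by
  induction s with
  | nil => cases h
  | cons c cs ih =>
    by_cases hc : c = '_'
    · subst hc
      have h1 : pvSplitRest ('_' :: cs) = cs := by simp [pvSplitRest]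
      rw [h1]
      simp only [pvLastSeg, List.reverse_cons]
      rw [pvTakeWhile_append_underscore _ (by decide)]
    · have hcs : '_' ∈ cs := by
        cases h with
        | head => exact absurd rfl hc
        | tail _ h' => exact h'
      have h1 : pvSplitRest (c :: cs) = pvSplitRest cs := by simp [pvSplitRest, hc]
      rw [h1, ih hcs]
      simp only [pvLastSeg, List.reverse_cons]
      rw [pvTakeWhile_append_of_mem _ (by decide) _ _ (by simpa using hcs)]

-- main invariant: whenever the last segment is a key, A's loop returns its value
theorem pvALoop_eq : ∀ n (s : List Char), s.length ≤ n →
    ∀ v, pvTable.lookup (pvLastSeg s) = some v → pvALoop s = v := by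
  intro n
  induction n with
  | zero =>
    intro s hlen v hv
    have : s = [] := List.eq_nil_of_length_eq_zero (Nat.le_zero.mp hlen)
    subst this; simp [pvLastSeg, pvTable, List.lookup] at hv
  | succ n ih =>
    intro s hlen v hv
    match s with
    | [] => simp [pvLastSeg, pvTable, List.lookup] at hv
    | c :: cs =>
      rw [pvALoop]
      cases hl : pvTable.lookup (c :: cs) with
      | some w =>
        have hnu := pvLookup_no_underscore _ _ hl
        rw [pvLastSeg_no_underscore _ hnu, hl] at hv
        simp only []
        exact Option.some.inj hv
      | none =>
        simp only []
        by_cases hm : '_' ∈ (c :: cs)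
        · rw [if_pos hm]
          apply ih _ (Nat.le_of_lt_succ (Nat.lt_of_lt_of_le (pvSplitRest_len_lt c cs) hlen))
          rw [pvLastSeg_splitRest _ hm]; exact hv
        · rw [pvLastSeg_no_underscore _ hm, hl] at hv
          cases hv

-- ===== VERDICT (by name: the statement is the Claim_ definition above) =====
theorem problem_name_for_spec : Claim_equal_problem_name_for := by
  intro slug _ hpre
  unfold Spec_problem_name_for problem_name_for problem_name_for_alt
  have hex : ∃ v, pvTable.lookup (pvLastSeg slug.toList) = some v := by
    unfold Pre_problem_name_for at hpre
    simp only [pvTable, List.map, List.mem_cons, List.not_mem_nil, or_false] at hpre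
    rcases hpre with h | h | h | h <;> rw [h] <;> exact ⟨_, rfl⟩
  rcases hex with ⟨v, hv⟩
  rw [hv, pvALoop_eq slug.toList.length slug.toList (Nat.le_refl _) v hv]
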